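-- pv_equiv track=rewrite | github.com/lljavierll025-spec/chatbot-phishing | src/phishbot/analyzers/eml_feature_extractor.py | _registrable_domain
-- ===== SOURCE A (Python) =====
-- MULTI_LEVEL_TLDS = {
--     "co.uk", "com.au", "com.br", "com.ar", "com.mx", "com.tr", "com.cn",
--     "com.sa", "com.eg", "com.ve", "com.co", "com.pe", "com.cl"
-- }
--
-- DOMAIN_ALIASES = {
--     "c.gle": "google.com",
--     "g.co": "google.com",
--     "googlemail.com": "google.com",
--     "gmail.com": "google.com",
--     "youtube.com": "google.com",
--     "yt.be": "google.com",
--     "1e100.net": "google.com",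
--     "facebookmail.com": "facebook.com",
--     "fb.com": "facebook.com",
--     "messaging.microsoft.com": "microsoft.com",
--     "outlook.com": "microsoft.com",
--     "office365.com": "microsoft.com"
-- }
--
-- def _registrable_domain(domain: str) -> str:
--     domain = (domain or "").lower().strip(".")
--     if not domain:
--         return ""
--     if domain in DOMAIN_ALIASES:
--         return DOMAIN_ALIASES[domain]
--     labels = domain.split(".")
--     if len(labels) < 2:
--         return domain
--     suffix = ".".join(labels[-2:])
--     for multi in MULTI_LEVEL_TLDS:
--         if domain.endswith("." + multi):
--             parts_needed = len(multi.split(".")) + 1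
--             if len(labels) >= parts_needed:
--                 return ".".join(labels[-parts_needed:])
--     return suffix
-- ===== SOURCE B (Python) =====
-- MULTI_LEVEL_TLDS = {
--     "co.uk", "com.au", "com.br", "com.ar", "com.mx", "com.tr", "com.cn",
--     "com.sa", "com.eg", "com.ve", "com.co", "com.pe", "com.cl"
-- }
--
-- DOMAIN_ALIASES = {
--     "c.gle": "google.com",
--     "g.co": "google.com",
--     "googlemail.com": "google.com",
--     "gmail.com": "google.com",
--     "youtube.com": "google.com",
--     "yt.be": "google.com",
--     "1e100.net": "google.com",
--     "facebookmail.com": "facebook.com",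
--     "fb.com": "facebook.com",
--     "messaging.microsoft.com": "microsoft.com",
--     "outlook.com": "microsoft.com",
--     "office365.com": "microsoft.com"
-- }
--
--
-- def _registrable_domain(domain: str) -> str:
--     host = (domain or "").lower().strip(".")
--     if not host:
--         return ""
--     alias = DOMAIN_ALIASES.get(host)
--     if alias is not None:
--         return alias
--     labels = host.split(".")
--     if len(labels) < 2:
--         return host
--     suffix = labels[-2] + "." + labels[-1]
--     if len(labels) >= 3 and suffix in MULTI_LEVEL_TLDS:
--         return labels[-3] + "." + suffix
--     return suffix
-- ===== Notes on version B (the rewrite author's own statement) =====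
-- stated objective: simpler
-- what changed: B drops A's endswith-scan over the MULTI_LEVEL_TLDS set: it joins the last two labels once and checks that single candidate's set membership (with a >=3-label guard), and its aliases branch uses dict.get instead of membership-then-index.
import Mathlib
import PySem

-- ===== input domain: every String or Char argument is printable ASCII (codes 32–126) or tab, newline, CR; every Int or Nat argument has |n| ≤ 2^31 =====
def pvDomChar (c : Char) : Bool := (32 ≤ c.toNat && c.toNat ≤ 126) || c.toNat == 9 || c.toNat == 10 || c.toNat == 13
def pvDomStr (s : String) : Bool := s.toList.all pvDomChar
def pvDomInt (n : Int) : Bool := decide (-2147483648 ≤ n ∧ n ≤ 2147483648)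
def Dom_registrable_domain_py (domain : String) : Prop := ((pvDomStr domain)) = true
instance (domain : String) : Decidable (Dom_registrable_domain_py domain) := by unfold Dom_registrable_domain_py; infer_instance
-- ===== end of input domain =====

-- B replaces A's endswith-scan over the multi-level-TLD set by joining the last two
-- labels once and testing that single candidate's set membership (objective: simpler).
-- Python A iterates the MULTI_LEVEL_TLDS set; the port iterates its elements in the
-- literal's order, which is sound because at most one entry can match a given domain
-- (proved in pvScan_eq), so the result does not depend on iteration order.

-- ===== PORT A =====
def pvMultis : List (List Char) :=
  ["co.uk".toList, "com.au".toList, "com.br".toList, "com.ar".toList, "com.mx".toList,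
   "com.tr".toList, "com.cn".toList, "com.sa".toList, "com.eg".toList, "com.ve".toList,
   "com.co".toList, "com.pe".toList, "com.cl".toList]

def pvMultiSet : PySem.Set (List Char) := PySem.Set.ofList pvMultis

def pvAliases : PySem.Dict (List Char) (List Char) := PySem.Dict.mk
  [("c.gle".toList, "google.com".toList),
   ("g.co".toList, "google.com".toList),
   ("googlemail.com".toList, "google.com".toList),
   ("gmail.com".toList, "google.com".toList),
   ("youtube.com".toList, "google.com".toList),
   ("yt.be".toList, "google.com".toList),
   ("1e100.net".toList, "google.com".toList),
   ("facebookmail.com".toList, "facebook.com".toList),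
   ("fb.com".toList, "facebook.com".toList),
   ("messaging.microsoft.com".toList, "microsoft.com".toList),
   ("outlook.com".toList, "microsoft.com".toList),
   ("office365.com".toList, "microsoft.com".toList)]

def pvScanA (dom : List Char) (labels : List (List Char)) :
    List (List Char) → Option (List Char)
  | [] => none
  | m :: rest =>
    if PySem.Chars.endswith dom ('.' :: m) then
      let needed := (PySem.Chars.splitOn m ['.']).length + 1
      if needed ≤ labels.length then
        some (PySem.Chars.join ['.'] (PySem.List.slice labels (some (-(needed : Int))) none))
      else pvScanA dom labels rest
    else pvScanA dom labels rest

def registrable_domain_py (domain : String) : String :=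
  let d := PySem.Chars.stripChars (PySem.Chars.lower domain.toList) ['.']
  if d = [] then ""
  else if pvAliases.contains d then String.ofList (pvAliases.getD d [])
  else
    let labels := PySem.Chars.splitOn d ['.']
    if labels.length < 2 then String.ofList d
    else
      let suffix := PySem.Chars.join ['.'] (PySem.List.slice labels (some (-2)) none)
      match pvScanA d labels pvMultiSet with
      | some r => String.ofList r
      | none => String.ofList suffix

-- ===== PORT B =====
def registrable_domain_py_alt (domain : String) : String :=
  let host := PySem.Chars.stripChars (PySem.Chars.lower domain.toList) ['.']
  if host = [] then ""
  else
    match pvAliases.get? host with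
    | some v => String.ofList v
    | none =>
      let labels := PySem.Chars.splitOn host ['.']
      if labels.length < 2 then String.ofList host
      else
        let suffix := ((PySem.List.pyGet? labels (-2)).getD []) ++
          '.' :: ((PySem.List.pyGet? labels (-1)).getD [])
        if 3 ≤ labels.length ∧ PySem.Set.contains pvMultiSet suffix = true then
          String.ofList (((PySem.List.pyGet? labels (-3)).getD []) ++ '.' :: suffix)
        else String.ofList suffix


-- ===== PRECONDITION & SPEC =====
def Spec_registrable_domain_py (domain : String) (out : String) : Prop := out = registrable_domain_py_alt domain
instance (domain : String) (out : String) : Decidable (Spec_registrable_domain_py domain out) := by unfold Spec_registrable_domain_py; infer_instance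

-- ===== CLAIM (what is proved, stated in full; the proofs are below) =====
def Claim_equal_registrable_domain_py : Prop := ∀ (domain : String), Dom_registrable_domain_py domain → Spec_registrable_domain_py domain (registrable_domain_py domain)

-- ===== LEMMAS AND PROOFS =====
def pvSegs (c : Char) : List Char → List (List Char)
  | [] => [[]]
  | a :: rest =>
    if a = c then [] :: pvSegs c rest
    else
      match pvSegs c rest with
      | [] => [[a]]
      | s :: ss => (a :: s) :: ss

theorem pvSegs_ne_nil (c : Char) (l : List Char) : pvSegs c l ≠ [] := by
  induction l with
  | nil => simp [pvSegs]
  | cons a rest ih =>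
    simp only [pvSegs]
    split
    · simp
    · cases h : pvSegs c rest <;> simp

theorem pvGo_eq (c : Char) : ∀ (fuel : Nat) (l cur : List Char) (acc : List (List Char)),
    l.length ≤ fuel →
    PySem.Chars.splitOn.go [c] fuel l cur acc =
      acc.reverse ++ (match pvSegs c l with
        | [] => [cur.reverse]
        | s :: ss => (cur.reverse ++ s) :: ss) := by
  intro fuel
  induction fuel with
  | zero =>
    intro l cur acc hl
    have : l = [] := by cases l <;> simp_all
    subst this
    simp [PySem.Chars.splitOn.go, pvSegs]
  | succ fuel ih =>
    intro l cur acc hl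
    cases l with
    | nil => simp [PySem.Chars.splitOn.go, pvSegs]
    | cons a rest =>
      rw [PySem.Chars.splitOn.go]
      by_cases hac : a = c
      · subst hac
        have hpre : List.isPrefixOf [a] (a :: rest) = true := by simp [List.isPrefixOf]
        simp only [hpre, if_true, List.length_cons, List.length_nil, List.drop_succ_cons, List.drop_zero]
        rw [ih rest [] (cur.reverse :: acc) (by simpa using Nat.lt_succ_iff.mp (by simpa using hl))]
        cases h : pvSegs a rest with
        | nil => exact absurd h (pvSegs_ne_nil a rest)
        | cons s ss => simp [pvSegs, h]
      · have hpre : List.isPrefixOf [c] (a :: rest) = false := by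
          simp [List.isPrefixOf]; exact fun h => absurd h.symm hac
        rw [if_neg (by simp [hpre])]
        rw [ih rest (a :: cur) acc (by simpa using Nat.lt_succ_iff.mp (by simpa using hl))]
        cases h : pvSegs c rest with
        | nil => exact absurd h (pvSegs_ne_nil c rest)
        | cons s ss => simp [pvSegs, h, hac]

theorem pvSplitOn_eq (c : Char) (l : List Char) :
    PySem.Chars.splitOn l [c] = pvSegs c l := by
  unfold PySem.Chars.splitOn
  rw [pvGo_eq c (l.length + 1) l [] [] (by omega)]
  cases h : pvSegs c l with
  | nil => exact absurd h (pvSegs_ne_nil c l)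
  | cons s ss => simp

theorem pvSegs_append (c : Char) (x y : List Char) :
    pvSegs c (x ++ c :: y) = pvSegs c x ++ pvSegs c y := by
  induction x with
  | nil => simp [pvSegs]
  | cons a rest ih =>
    by_cases hac : a = c
    · subst hac; simp [pvSegs, ih]
    · simp only [List.cons_append, pvSegs, hac, if_false, ih]
      cases h : pvSegs c rest with
      | nil => exact absurd h (pvSegs_ne_nil c rest)
      | cons s ss => simp

theorem pvSegs_no_c (c : Char) (y : List Char) (h : c ∉ y) : pvSegs c y = [y] := by
  induction y with
  | nil => simp [pvSegs]
  | cons a rest ih =>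
    simp only [List.mem_cons, not_or] at h
    simp [pvSegs, Ne.symm h.1, ih h.2]

theorem pvSegs_mem_no_c (c : Char) (l : List Char) : ∀ s ∈ pvSegs c l, c ∉ s := by
  induction l with
  | nil => simp [pvSegs]
  | cons a rest ih =>
    by_cases hac : a = c
    · subst hac; simp only [pvSegs, if_true]
      intro s hs
      rcases List.mem_cons.mp hs with rfl | hs
      · simp
      · exact ih s hs
    · simp only [pvSegs, hac, if_false]
      cases h : pvSegs c rest with
      | nil => exact absurd h (pvSegs_ne_nil c rest)
      | cons s ss =>
        intro t ht
        rcases List.mem_cons.mp ht with rfl | ht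
        · intro hc
          rcases List.mem_cons.mp hc with rfl | hc
          · exact hac rfl
          · exact ih s (h ▸ List.mem_cons_self) hc
        · exact ih t (h ▸ List.mem_cons_of_mem s ht)

theorem pvJoin_segs (c : Char) (l : List Char) :
    PySem.Chars.join [c] (pvSegs c l) = l := by
  induction l with
  | nil => simp [pvSegs, PySem.Chars.join_singleton]
  | cons a rest ih =>
    by_cases hac : a = c
    · subst hac
      simp only [pvSegs, if_true]
      cases h : pvSegs a rest with
      | nil => exact absurd h (pvSegs_ne_nil a rest)
      | cons s ss =>
        rw [PySem.Chars.join_cons_cons]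
        rw [h] at ih; rw [ih]; simp
    · simp only [pvSegs, hac, if_false]
      cases h : pvSegs c rest with
      | nil => exact absurd h (pvSegs_ne_nil c rest)
      | cons s ss =>
        rw [h] at ih
        cases ss with
        | nil =>
          rw [PySem.Chars.join_singleton]
          rw [PySem.Chars.join_singleton] at ih
          rw [ih]
        | cons t ts =>
          rw [PySem.Chars.join_cons_cons]
          rw [PySem.Chars.join_cons_cons] at ih
          simp only [List.cons_append, List.append_assoc] at ih ⊢
          rw [ih]

theorem pvJoin_append (c : Char) (xs ys : List (List Char)) (hx : xs ≠ []) (hy : ys ≠ []) :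
    PySem.Chars.join [c] (xs ++ ys) = PySem.Chars.join [c] xs ++ c :: PySem.Chars.join [c] ys := by
  induction xs with
  | nil => exact absurd rfl hx
  | cons x xs ih =>
    cases xs with
    | nil =>
      cases ys with
      | nil => exact absurd rfl hy
      | cons y ys =>
        rw [List.singleton_append, PySem.Chars.join_cons_cons, PySem.Chars.join_singleton]
        simp
    | cons x' xs' =>
      rw [show (x :: x' :: xs') ++ ys = x :: x' :: (xs' ++ ys) by simp]
      rw [PySem.Chars.join_cons_cons]
      rw [show x' :: (xs' ++ ys) = (x' :: xs') ++ ys by simp]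
      rw [ih (by simp), PySem.Chars.join_cons_cons]
      simp

theorem pvEndsIff (cs a b : List Char) (ha : '.' ∉ a) (hb : '.' ∉ b) :
    PySem.Chars.endswith cs ('.' :: (a ++ '.' :: b)) = true ↔
      ∃ pre, pre ≠ [] ∧ pvSegs '.' cs = pre ++ [a, b] := by
  rw [PySem.Chars.endswith_iff]
  constructor
  · rintro ⟨x, rfl⟩
    refine ⟨pvSegs '.' x, pvSegs_ne_nil '.' x, ?_⟩
    rw [pvSegs_append, pvSegs_append, pvSegs_no_c '.' a ha, pvSegs_no_c '.' b hb]
    simp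
  · rintro ⟨pre, hpre, hseg⟩
    refine ⟨PySem.Chars.join ['.'] pre, ?_⟩
    have := pvJoin_segs '.' cs
    rw [hseg, pvJoin_append '.' pre [a, b] hpre (by simp)] at this
    rw [← this, PySem.Chars.join_cons_cons, PySem.Chars.join_singleton]
    simp

theorem pvExistsLastTwo {α : Type} (l : List α) (h : 2 ≤ l.length) :
    ∃ init x y, l = init ++ [x, y] := by
  rcases l.eq_nil_or_concat with rfl | ⟨l1, y, rfl⟩
  · simp at h
  · rcases l1.eq_nil_or_concat with rfl | ⟨l2, x, rfl⟩
    · simp at h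
    · exact ⟨l2, x, y, by simp⟩

theorem pvSliceNegSuffix {α : Type} (init ys : List α) (hy : ys ≠ []) :
    PySem.List.slice (init ++ ys) (some (-(ys.length : Int))) none = ys := by
  have hpos : 0 < ys.length := List.length_pos_iff.mpr hy
  simp only [PySem.List.slice, PySem.List.clampIdx, List.length_append]
  rw [if_pos (by omega), if_neg (by push_cast; omega)]
  have h1 : (((init.length + ys.length : Nat) : Int) + -(ys.length : Int)).toNat = init.length := by
    push_cast; omega
  rw [h1, List.drop_left, show init.length + ys.length - init.length = ys.length by omega,
    List.take_length]

theorem pvGetNeg {α : Type} (l : List α) (k : Nat) (hk : k < l.length) :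
    PySem.List.pyGet? l (-((k : Int) + 1)) = l[l.length - 1 - k]? := by
  simp only [PySem.List.pyGet?, PySem.List.pyIdx?]
  rw [if_neg (by omega), if_pos (by omega)]
  simp only [Option.bind_some]
  congr 1
  omega


theorem pvScan_eq (cs l2 l1 : List Char) (pre0 : List (List Char))
    (hsplit : pvSegs '.' cs = pre0 ++ [l2, l1]) :
    ∀ ms : List (List Char),
      (∀ m ∈ ms, ∃ a b, m = a ++ '.' :: b ∧ '.' ∉ a ∧ '.' ∉ b) →
      pvScanA cs (pre0 ++ [l2, l1]) ms =
        if pre0 ≠ [] ∧ (l2 ++ '.' :: l1) ∈ ms then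
          some (PySem.Chars.join ['.']
            (PySem.List.slice (pre0 ++ [l2, l1]) (some (-3)) none))
        else none := by
  intro ms
  induction ms with
  | nil => intro _; simp [pvScanA]
  | cons m rest ih =>
    intro htwo
    obtain ⟨a, b, rfl, ha, hb⟩ := htwo _ List.mem_cons_self
    have hrest := fun m hm => htwo m (List.mem_cons_of_mem _ hm)
    by_cases hend : PySem.Chars.endswith cs ('.' :: (a ++ '.' :: b)) = true
    · obtain ⟨pre, hpre, hseg⟩ := (pvEndsIff cs a b ha hb).mp hend
      rw [hsplit] at hseg
      obtain ⟨h1, h2⟩ := List.append_inj hseg (by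
        have := congrArg List.length hseg
        simp at this; omega)
      simp only [List.cons.injEq, and_true] at h2
      obtain ⟨rfl, rfl⟩ := h2
      subst h1
      have hinit : pre0 ≠ [] := hpre
      have hlen : 1 ≤ pre0.length := by
        cases pre0
        · exact absurd rfl hinit
        · simp
      simp only [pvScanA, hend, if_true]
      rw [pvSplitOn_eq, pvSegs_append, pvSegs_no_c '.' l2 ha, pvSegs_no_c '.' l1 hb]
      rw [if_pos (by simp; omega)]
      rw [if_pos ⟨hinit, List.mem_cons_self⟩]
      norm_num
    · simp only [pvScanA]
      rw [if_neg (by simp [hend]), ih hrest]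
      by_cases hc : pre0 ≠ [] ∧ (l2 ++ '.' :: l1) ∈ rest
      · rw [if_pos hc, if_pos ⟨hc.1, List.mem_cons_of_mem _ hc.2⟩]
      · rw [if_neg hc, if_neg ?_]
        rintro ⟨hinit, hmem⟩
        rcases List.mem_cons.mp hmem with heq | hmem
        · have hl2 : '.' ∉ l2 := pvSegs_mem_no_c '.' cs l2 (hsplit ▸ (by simp))
          have hl1 : '.' ∉ l1 := pvSegs_mem_no_c '.' cs l1 (hsplit ▸ (by simp))
          have hpv : pvSegs '.' (l2 ++ '.' :: l1) = pvSegs '.' (a ++ '.' :: b) := by rw [heq]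
          rw [pvSegs_append, pvSegs_append, pvSegs_no_c '.' a ha, pvSegs_no_c '.' b hb,
            pvSegs_no_c '.' l2 hl2, pvSegs_no_c '.' l1 hl1] at hpv
          simp only [List.cons.injEq, and_true, List.singleton_append] at hpv
          obtain ⟨rfl, rfl⟩ := hpv
          exact hend ((pvEndsIff cs l2 l1 ha hb).mpr ⟨pre0, hinit, hsplit⟩)
        · exact hc ⟨hinit, hmem⟩

theorem pvAnyFind {α : Type} (p : α → Bool) (l : List α) :
    l.any p = (l.find? p).isSome := by
  induction l with
  | nil => simp
  | cons x xs ih =>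
    by_cases hp : p x
    · simp [hp]
    · simp only [List.any_cons, List.find?_cons]
      simp [hp, ih]

theorem pvContains_eq_isSome {κ ν : Type} [BEq κ] (dd : PySem.Dict κ ν) (k : κ) :
    dd.contains k = (dd.get? k).isSome := by
  simp only [PySem.Dict.contains, PySem.Dict.get?, Option.isSome_map]
  exact pvAnyFind _ _

theorem pvMultis_two : ∀ m ∈ pvMultis, ∃ a b, m = a ++ '.' :: b ∧ '.' ∉ a ∧ '.' ∉ b := by
  intro m hm
  simp only [pvMultis, List.mem_cons, List.not_mem_nil, or_false] at hm
  rcases hm with rfl|rfl|rfl|rfl|rfl|rfl|rfl|rfl|rfl|rfl|rfl|rfl|rfl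
  · exact ⟨['c','o'], ['u','k'], by decide, by decide, by decide⟩
  · exact ⟨['c','o','m'], ['a','u'], by decide, by decide, by decide⟩
  · exact ⟨['c','o','m'], ['b','r'], by decide, by decide, by decide⟩
  · exact ⟨['c','o','m'], ['a','r'], by decide, by decide, by decide⟩
  · exact ⟨['c','o','m'], ['m','x'], by decide, by decide, by decide⟩
  · exact ⟨['c','o','m'], ['t','r'], by decide, by decide, by decide⟩
  · exact ⟨['c','o','m'], ['c','n'], by decide, by decide, by decide⟩
  · exact ⟨['c','o','m'], ['s','a'], by decide, by decide, by decide⟩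
  · exact ⟨['c','o','m'], ['e','g'], by decide, by decide, by decide⟩
  · exact ⟨['c','o','m'], ['v','e'], by decide, by decide, by decide⟩
  · exact ⟨['c','o','m'], ['c','o'], by decide, by decide, by decide⟩
  · exact ⟨['c','o','m'], ['p','e'], by decide, by decide, by decide⟩
  · exact ⟨['c','o','m'], ['c','l'], by decide, by decide, by decide⟩

theorem pvMultiSet_eq : pvMultiSet = pvMultis := by decide

theorem pvPorts_eq (domain : String) : registrable_domain_py domain = registrable_domain_py_alt domain := by
  unfold registrable_domain_py registrable_domain_py_alt
  set d := PySem.Chars.stripChars (PySem.Chars.lower domain.toList) ['.'] with hd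
  by_cases h0 : d = []
  · simp [h0]
  · rw [if_neg h0, if_neg h0]
    cases hget : pvAliases.get? d with
    | some v =>
      rw [if_pos (by rw [pvContains_eq_isSome, hget]; rfl)]
      simp [PySem.Dict.getD, hget]
    | none =>
      rw [if_neg (by rw [pvContains_eq_isSome, hget]; simp)]
      dsimp only
      by_cases hl2 : (PySem.Chars.splitOn d ['.']).length < 2
      · rw [if_pos hl2, if_pos hl2]
      · rw [if_neg hl2, if_neg hl2]
        obtain ⟨pre0, l2, l1, hdec⟩ := pvExistsLastTwo (PySem.Chars.splitOn d ['.']) (by omega)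
        have hseg : pvSegs '.' d = pre0 ++ [l2, l1] := by rw [← pvSplitOn_eq, hdec]
        rw [hdec]
        have hsliceA : PySem.List.slice (pre0 ++ [l2, l1]) (some (-2)) none = [l2, l1] := by
          rw [show (-2 : Int) = -(([l2, l1].length : Nat) : Int) by simp]
          exact pvSliceNegSuffix pre0 [l2, l1] (by simp)
        have hjoin2 : PySem.Chars.join ['.'] [l2, l1] = l2 ++ '.' :: l1 := by
          rw [PySem.Chars.join_cons_cons, PySem.Chars.join_singleton]; simp
        have hg1 : PySem.List.pyGet? (pre0 ++ [l2, l1]) (-1) = some l1 := by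
          rw [show (-1 : Int) = -(((0 : Nat) : Int) + 1) by norm_num,
            pvGetNeg _ 0 (by simp)]
          have he : (pre0 ++ [l2, l1]).length - 1 - 0 = pre0.length + 1 := by simp
          rw [he, List.getElem?_append_right (by omega)]
          simp
        have hg2 : PySem.List.pyGet? (pre0 ++ [l2, l1]) (-2) = some l2 := by
          rw [show (-2 : Int) = -(((1 : Nat) : Int) + 1) by norm_num,
            pvGetNeg _ 1 (by simp)]
          have he : (pre0 ++ [l2, l1]).length - 1 - 1 = pre0.length := by simp
          rw [he, List.getElem?_append_right (by omega)]
          simp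
        rw [pvScan_eq d l2 l1 pre0 hseg pvMultiSet (by rw [pvMultiSet_eq]; exact pvMultis_two)]
        rw [hg1, hg2]
        simp only [Option.getD_some]
        have hiff : (pre0 ≠ [] ∧ (l2 ++ '.' :: l1) ∈ pvMultiSet) ↔
            (3 ≤ (pre0 ++ [l2, l1]).length ∧
              PySem.Set.contains pvMultiSet (l2 ++ '.' :: l1) = true) := by
          have hc1 : (PySem.Set.contains pvMultiSet (l2 ++ '.' :: l1) = true) ↔
              (l2 ++ '.' :: l1) ∈ pvMultiSet := by simp [PySem.Set.contains]
          have hc2 : pre0 ≠ [] ↔ 3 ≤ (pre0 ++ [l2, l1]).length := by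
            constructor
            · intro h
              have := List.length_pos_iff.mpr h
              simp only [List.length_append, List.length_cons, List.length_nil]
              omega
            · intro h hn
              subst hn
              simp at h
          rw [← hc1, ← hc2]
        by_cases hcond : pre0 ≠ [] ∧ (l2 ++ '.' :: l1) ∈ pvMultiSet
        · rw [if_pos hcond, if_pos (hiff.mp hcond)]
          dsimp only
          obtain ⟨i2, q, rfl⟩ : ∃ i2 q, pre0 = i2 ++ [q] := by
            rcases pre0.eq_nil_or_concat with rfl | ⟨i2, q, rfl⟩
            · exact absurd rfl hcond.1
            · exact ⟨i2, q, by simp⟩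
          have hg3 : PySem.List.pyGet? ((i2 ++ [q]) ++ [l2, l1]) (-3) = some q := by
            rw [show (-3 : Int) = -(((2 : Nat) : Int) + 1) by norm_num,
              pvGetNeg _ 2 (by simp)]
            have he : ((i2 ++ [q]) ++ [l2, l1]).length - 1 - 2 = i2.length := by simp
            rw [he, show (i2 ++ [q]) ++ [l2, l1] = i2 ++ [q, l2, l1] by simp,
              List.getElem?_append_right (by omega)]
            simp
          rw [hg3]
          have hslice3 : PySem.List.slice ((i2 ++ [q]) ++ [l2, l1]) (some (-3)) none
              = [q, l2, l1] := by
            rw [show (i2 ++ [q]) ++ [l2, l1] = i2 ++ [q, l2, l1] by simp,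
              show (-3 : Int) = -(([q, l2, l1].length : Nat) : Int) by simp]
            exact pvSliceNegSuffix i2 [q, l2, l1] (by simp)
          rw [hslice3, PySem.Chars.join_cons_cons, PySem.Chars.join_cons_cons,
            PySem.Chars.join_singleton]
          simp
        · rw [if_neg hcond, if_neg (fun h => hcond (hiff.mpr h))]
          dsimp only
          rw [hsliceA, hjoin2]

-- ===== VERDICT (by name: the statement is the Claim_ definition above) =====
theorem registrable_domain_py_spec : Claim_equal_registrable_domain_py := by
  intro domain _
  unfold Spec_registrable_domain_py
  exact pvPorts_eq domain
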